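-- pv_equiv track=rewrite | github.com/manuelsongStony/AlgorithmStudy | CodingTest/kaka1.py | solution
-- ===== SOURCE A (Python) =====
-- def solution(survey, choices):
--     answer = ''
--     table=[[0,0,0,0],[0,0,0,0]]
--
--     for i in range(len(survey)):
--
--         if survey[i]=='RT':
--             if choices[i]<=4:
--                 table[0][0]+=(4-choices[i])
--             else:
--                 table[1][0] += (choices[i]-4)
--         elif survey[i]=='TR':
--             if choices[i]<=4:
--                 table[1][0]+=(4-choices[i])
--             else:
--                 table[0][0] += (choices[i]-4)
--
--         elif survey[i]=='CF':
--             if choices[i]<=4: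
--                 table[0][1]+=(4-choices[i])
--             else:
--                 table[1][1] += (choices[i]-4)
--         elif survey[i]=='FC':
--             if choices[i]<=4:
--                 table[1][1]+=(4-choices[i])
--             else:
--                 table[0][1] += (choices[i]-4)
--
--         elif survey[i]=='JM':
--             if choices[i]<=4:
--                 table[0][2]+=(4-choices[i])
--             else:
--                 table[1][2] += (choices[i]-4)
--         elif survey[i]=='MJ':
--             if choices[i]<=4:
--                 table[1][2]+=(4-choices[i])
--             else:
--                 table[0][2] += (choices[i]-4)
--
--         elif survey[i]=='AN':
--             if choices[i]<=4:
--                 table[0][3]+=(4-choices[i])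
--             else:
--                 table[1][3] += (choices[i]-4)
--
--         elif survey[i]=='NA':
--             if choices[i]<=4:
--                 table[1][3]+=(4-choices[i])
--             else:
--                 table[0][3] += (choices[i]-4)
--
--
--     if table[0][0]>=table[1][0]:
--         answer=answer+'R'
--     else:
--         answer = answer + 'T'
--
--     if table[0][1]>=table[1][1]:
--         answer=answer+'C'
--     else:
--         answer = answer + 'F'
--
--     if table[0][2]>=table[1][2]:
--         answer=answer+'J'
--     else:
--         answer = answer + 'M'
--
--     if table[0][3]>=table[1][3]:
--         answer=answer+'A'
--     else:
--         answer = answer + 'N'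
--
--
--
--
--     return answer
-- ===== SOURCE B (Python) =====
-- def solution(survey, choices):
--     def pick(first, second):
--         fwd, rev = first + second, second + first
--         diff = sum(4 - choices[i] if s == fwd else choices[i] - 4
--                    for i, s in enumerate(survey) if s == fwd or s == rev)
--         return first if diff >= 0 else second
--     return pick('R', 'T') + pick('C', 'F') + pick('J', 'M') + pick('A', 'N')
-- ===== Notes on version B (the rewrite author's own statement) =====
-- stated objective: simpler
-- what changed: Replaces the single pass over a 2x4 table with an 8-branch if/elif chain by four staged per-axis passes that each compute one signed score difference (a matching answer contributes 4-c for the forward pair, c-4 for the reversed pair, with no c<=4 case split or separate buckets) and pick the first letter iff the difference is >= 0.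
import Mathlib
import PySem

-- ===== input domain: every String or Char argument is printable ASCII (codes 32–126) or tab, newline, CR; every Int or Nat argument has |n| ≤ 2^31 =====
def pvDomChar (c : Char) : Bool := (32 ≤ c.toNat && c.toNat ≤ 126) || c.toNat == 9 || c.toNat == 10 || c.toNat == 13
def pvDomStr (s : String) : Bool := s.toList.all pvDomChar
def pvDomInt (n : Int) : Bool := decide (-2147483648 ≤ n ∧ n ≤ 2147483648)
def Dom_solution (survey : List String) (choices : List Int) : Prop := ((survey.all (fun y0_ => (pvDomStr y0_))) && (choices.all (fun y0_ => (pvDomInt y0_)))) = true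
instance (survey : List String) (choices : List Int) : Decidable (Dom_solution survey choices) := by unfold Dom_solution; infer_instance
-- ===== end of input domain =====

-- B replaces A's single pass over a 2x4 table (8-branch if/elif chain, c<=4 two-bucket split)
-- by four staged per-axis passes that each compute one SIGNED score difference and pick the
-- first letter iff it is >= 0 (objective: simpler).

-- ===== PORT A =====
def solution (survey : List String) (choices : List Int) : String :=
  let answer : String := ""
  let table : (Int × Int × Int × Int) × (Int × Int × Int × Int) :=
    ((0, 0, 0, 0), (0, 0, 0, 0))
  let table := (PySem.List.pyRange 0 (survey.length : Int) 1).foldl (fun tb i =>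
    let s := PySem.List.pyGetD survey i ""
    let c := PySem.List.pyGetD choices i 0
    let ((t00, t01, t02, t03), (t10, t11, t12, t13)) := tb
    if s = "RT" then
      if c ≤ 4 then ((t00 + (4 - c), t01, t02, t03), (t10, t11, t12, t13))
      else ((t00, t01, t02, t03), (t10 + (c - 4), t11, t12, t13))
    else if s = "TR" then
      if c ≤ 4 then ((t00, t01, t02, t03), (t10 + (4 - c), t11, t12, t13))
      else ((t00 + (c - 4), t01, t02, t03), (t10, t11, t12, t13))
    else if s = "CF" then
      if c ≤ 4 then ((t00, t01 + (4 - c), t02, t03), (t10, t11, t12, t13))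
      else ((t00, t01, t02, t03), (t10, t11 + (c - 4), t12, t13))
    else if s = "FC" then
      if c ≤ 4 then ((t00, t01, t02, t03), (t10, t11 + (4 - c), t12, t13))
      else ((t00, t01 + (c - 4), t02, t03), (t10, t11, t12, t13))
    else if s = "JM" then
      if c ≤ 4 then ((t00, t01, t02 + (4 - c), t03), (t10, t11, t12, t13))
      else ((t00, t01, t02, t03), (t10, t11, t12 + (c - 4), t13))
    else if s = "MJ" then
      if c ≤ 4 then ((t00, t01, t02, t03), (t10, t11, t12 + (4 - c), t13))
      else ((t00, t01, t02 + (c - 4), t03), (t10, t11, t12, t13))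
    else if s = "AN" then
      if c ≤ 4 then ((t00, t01, t02, t03 + (4 - c)), (t10, t11, t12, t13))
      else ((t00, t01, t02, t03), (t10, t11, t12, t13 + (c - 4)))
    else if s = "NA" then
      if c ≤ 4 then ((t00, t01, t02, t03), (t10, t11, t12, t13 + (4 - c)))
      else ((t00, t01, t02, t03 + (c - 4)), (t10, t11, t12, t13))
    else tb) table
  let ((t00, t01, t02, t03), (t10, t11, t12, t13)) := table
  let answer := answer ++ (if t00 ≥ t10 then "R" else "T")
  let answer := answer ++ (if t01 ≥ t11 then "C" else "F")
  let answer := answer ++ (if t02 ≥ t12 then "J" else "M")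
  let answer := answer ++ (if t03 ≥ t13 then "A" else "N")
  answer

-- ===== PORT B =====
-- pick(first, second): one pass over enumerate(survey) summing signed contributions for this
-- axis (4-c for the forward pair, c-4 for the reversed pair); choices[i] ported as pyGetD
-- (exact under Pre_solution, where every matching index is in range).
def pvPick (first second : Char) (survey : List String) (choices : List Int) : String :=
  let fwd := String.ofList [first, second]
  let rev := String.ofList [second, first]
  let diff := ((PySem.List.enumerate survey).filter (fun p => p.2 == fwd || p.2 == rev)).foldl
      (fun acc p => acc + (if p.2 == fwd then 4 - PySem.List.pyGetD choices p.1 0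
                           else PySem.List.pyGetD choices p.1 0 - 4)) 0
  if diff ≥ 0 then String.ofList [first] else String.ofList [second]

def solution_alt (survey : List String) (choices : List Int) : String :=
  pvPick 'R' 'T' survey choices ++ pvPick 'C' 'F' survey choices ++
  pvPick 'J' 'M' survey choices ++ pvPick 'A' 'N' survey choices

-- ===== PRECONDITION & SPEC =====
def pvVALID : List String := ["RT", "TR", "CF", "FC", "JM", "MJ", "AN", "NA"]
-- Pre_ excludes exactly the inputs where the Python A raises IndexError: a recognized survey
-- pair at an index ≥ len(choices) (B raises there as well).
def Pre_solution (survey : List String) (choices : List Int) : Prop :=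
  ∀ s ∈ survey.drop choices.length, s ∉ pvVALID
instance (survey : List String) (choices : List Int) : Decidable (Pre_solution survey choices) := by unfold Pre_solution; infer_instance
def pvWitness_solution : List String × List Int := (["RT", "xy", "MJ"], [1, 7, 5])

def Spec_solution (survey : List String) (choices : List Int) (out : String) : Prop := out = solution_alt survey choices
instance (survey : List String) (choices : List Int) (out : String) : Decidable (Spec_solution survey choices out) := by unfold Spec_solution; infer_instance

-- ===== CLAIM (what is proved, stated in full; the proofs are below) =====
def Claim_equal_solution : Prop := ∀ (survey : List String) (choices : List Int), Dom_solution survey choices → Pre_solution survey choices → Spec_solution survey choices (solution survey choices)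

-- ===== LEMMAS AND PROOFS =====
def pvSt := (Int × Int × Int × Int) × (Int × Int × Int × Int)

def pvStepA (tb : pvSt) (s : String) (c : Int) : pvSt :=
    let ((t00, t01, t02, t03), (t10, t11, t12, t13)) := tb
    if s = "RT" then
      if c ≤ 4 then ((t00 + (4 - c), t01, t02, t03), (t10, t11, t12, t13))
      else ((t00, t01, t02, t03), (t10 + (c - 4), t11, t12, t13))
    else if s = "TR" then
      if c ≤ 4 then ((t00, t01, t02, t03), (t10 + (4 - c), t11, t12, t13))
      else ((t00 + (c - 4), t01, t02, t03), (t10, t11, t12, t13))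
    else if s = "CF" then
      if c ≤ 4 then ((t00, t01 + (4 - c), t02, t03), (t10, t11, t12, t13))
      else ((t00, t01, t02, t03), (t10, t11 + (c - 4), t12, t13))
    else if s = "FC" then
      if c ≤ 4 then ((t00, t01, t02, t03), (t10, t11 + (4 - c), t12, t13))
      else ((t00, t01 + (c - 4), t02, t03), (t10, t11, t12, t13))
    else if s = "JM" then
      if c ≤ 4 then ((t00, t01, t02 + (4 - c), t03), (t10, t11, t12, t13))
      else ((t00, t01, t02, t03), (t10, t11, t12 + (c - 4), t13))
    else if s = "MJ" then
      if c ≤ 4 then ((t00, t01, t02, t03), (t10, t11, t12 + (4 - c), t13))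
      else ((t00, t01, t02 + (c - 4), t03), (t10, t11, t12, t13))
    else if s = "AN" then
      if c ≤ 4 then ((t00, t01, t02, t03 + (4 - c)), (t10, t11, t12, t13))
      else ((t00, t01, t02, t03), (t10, t11, t12, t13 + (c - 4)))
    else if s = "NA" then
      if c ≤ 4 then ((t00, t01, t02, t03), (t10, t11, t12, t13 + (4 - c)))
      else ((t00, t01, t02, t03 + (c - 4)), (t10, t11, t12, t13))
    else tb

def pvLoopA : List String → List Int → pvSt → pvSt
  | [], _, tb => tb
  | s :: sv, cs, tb => pvLoopA sv cs.tail (pvStepA tb s (cs.headD 0))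

-- per-axis signed contribution of one answer
def pvContrib (fwd rev s : String) (c : Int) : Int :=
  if s = fwd then 4 - c else if s = rev then c - 4 else 0

-- per-axis signed sum, consumed in step with the survey list
def pvSum (fwd rev : String) : List String → List Int → Int
  | [], _ => 0
  | s :: sv, cs => pvContrib fwd rev s (cs.headD 0) + pvSum fwd rev sv cs.tail

theorem pv_headD_drop (cs : List Int) (a : Nat) : (cs.drop a).headD 0 = cs.getD a 0 := by
  induction cs generalizing a with
  | nil => simp [List.getD]
  | cons c cs ih =>
    cases a with
    | zero => simp [List.getD]
    | succ a => simp [List.getD]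

theorem pv_rangeA (survey : List String) (choices : List Int) :
    ∀ (n a : Nat), a + n = survey.length → ∀ (tb : pvSt),
    (PySem.List.pyRange (a : Int) (survey.length : Int) 1).foldl (fun tb i =>
      pvStepA tb (PySem.List.pyGetD survey i "") (PySem.List.pyGetD choices i 0)) tb
      = pvLoopA (survey.drop a) (choices.drop a) tb := by
  intro n
  induction n with
  | zero =>
    intro a ha tb
    have : PySem.List.pyRange (a : Int) (survey.length : Int) 1 = [] := by
      simp [PySem.List.pyRange]; omega
    simp [this, List.drop_eq_nil_of_le (by omega : survey.length ≤ a), pvLoopA]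
  | succ n ih =>
    intro a ha tb
    have hlt : (a : Int) < (survey.length : Int) := by exact_mod_cast (by omega : a < survey.length)
    rw [PySem.List.pyRange_one_cons hlt]
    simp only [List.foldl_cons]
    have h1 : ((a : Int) + 1) = ((a + 1 : Nat) : Int) := by push_cast; ring
    rw [h1, ih (a + 1) (by omega)]
    have hs : survey.drop a = survey[a] :: survey.drop (a + 1) :=
      List.drop_eq_getElem_cons (by omega)
    rw [hs]
    simp only [pvLoopA]
    congr 1
    · exact (List.tail_drop).symm
    · congr 1
      · simp [PySem.List.pyGetD_natCast, List.getD, List.getElem?_eq_getElem (by omega : a < survey.length)]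
      · rw [pv_headD_drop, PySem.List.pyGetD_natCast]

theorem pvStepA_invalid (tb : pvSt) (s : String) (c : Int) (h : s ∉ pvVALID) :
    pvStepA tb s c = tb := by
  obtain ⟨⟨t00, t01, t02, t03⟩, ⟨t10, t11, t12, t13⟩⟩ := tb
  simp only [pvVALID, List.mem_cons, List.not_mem_nil, or_false, not_or] at h
  obtain ⟨h1, h2, h3, h4, h5, h6, h7, h8⟩ := h
  simp [pvStepA, h1, h2, h3, h4, h5, h6, h7, h8]

-- the four signed diffs of A's table move by exactly the four axis contributions
set_option maxHeartbeats 1000000 in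
theorem pvStepA_diff (tb : pvSt) (s : String) (c : Int) :
    (pvStepA tb s c).1.1 - (pvStepA tb s c).2.1 = tb.1.1 - tb.2.1 + pvContrib "RT" "TR" s c ∧
    (pvStepA tb s c).1.2.1 - (pvStepA tb s c).2.2.1 = tb.1.2.1 - tb.2.2.1 + pvContrib "CF" "FC" s c ∧
    (pvStepA tb s c).1.2.2.1 - (pvStepA tb s c).2.2.2.1 = tb.1.2.2.1 - tb.2.2.2.1 + pvContrib "JM" "MJ" s c ∧
    (pvStepA tb s c).1.2.2.2 - (pvStepA tb s c).2.2.2.2 = tb.1.2.2.2 - tb.2.2.2.2 + pvContrib "AN" "NA" s c := by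
  obtain ⟨⟨t00, t01, t02, t03⟩, ⟨t10, t11, t12, t13⟩⟩ := tb
  by_cases hv : s ∈ pvVALID
  · simp only [pvVALID, List.mem_cons, List.not_mem_nil, or_false] at hv
    rcases hv with rfl | rfl | rfl | rfl | rfl | rfl | rfl | rfl <;>
      by_cases hc : c ≤ 4 <;>
      simp [pvStepA, pvContrib, hc] <;> omega
  · rw [pvStepA_invalid _ _ _ hv]
    simp only [pvVALID, List.mem_cons, List.not_mem_nil, or_false, not_or] at hv
    obtain ⟨h1, h2, h3, h4, h5, h6, h7, h8⟩ := hv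
    simp [pvContrib, h1, h2, h3, h4, h5, h6, h7, h8]

theorem pvLoopA_diff (sv : List String) : ∀ (cs : List Int) (tb : pvSt),
    (pvLoopA sv cs tb).1.1 - (pvLoopA sv cs tb).2.1 = tb.1.1 - tb.2.1 + pvSum "RT" "TR" sv cs ∧
    (pvLoopA sv cs tb).1.2.1 - (pvLoopA sv cs tb).2.2.1 = tb.1.2.1 - tb.2.2.1 + pvSum "CF" "FC" sv cs ∧
    (pvLoopA sv cs tb).1.2.2.1 - (pvLoopA sv cs tb).2.2.2.1 = tb.1.2.2.1 - tb.2.2.2.1 + pvSum "JM" "MJ" sv cs ∧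
    (pvLoopA sv cs tb).1.2.2.2 - (pvLoopA sv cs tb).2.2.2.2 = tb.1.2.2.2 - tb.2.2.2.2 + pvSum "AN" "NA" sv cs := by
  induction sv with
  | nil => intro cs tb; simp [pvLoopA, pvSum]
  | cons s sv ih =>
    intro cs tb
    obtain ⟨i1, i2, i3, i4⟩ := ih cs.tail (pvStepA tb s (cs.headD 0))
    obtain ⟨d1, d2, d3, d4⟩ := pvStepA_diff tb s (cs.headD 0)
    simp only [pvLoopA, pvSum]
    refine ⟨?_, ?_, ?_, ?_⟩ <;> omega

-- B's filtered fold equals the structural per-axis sum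
theorem pvPick_sum (fwd rev : String) (choices : List Int) :
    ∀ (sv : List String) (k : Nat) (acc : Int),
    ((PySem.List.enumerate sv (k : Int)).filter (fun p => p.2 == fwd || p.2 == rev)).foldl
      (fun acc p => acc + (if p.2 == fwd then 4 - PySem.List.pyGetD choices p.1 0
                           else PySem.List.pyGetD choices p.1 0 - 4)) acc
      = acc + pvSum fwd rev sv (choices.drop k) := by
  intro sv
  induction sv with
  | nil => intro k acc; simp [PySem.List.enumerate_nil, pvSum]
  | cons s sv ih =>
    intro k acc
    rw [PySem.List.enumerate_cons, List.filter_cons]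
    have hk1 : ((k : Int) + 1) = ((k + 1 : Nat) : Int) := by push_cast; ring
    have hget : PySem.List.pyGetD choices (k : Int) 0 = (choices.drop k).headD 0 := by
      rw [PySem.List.pyGetD_natCast, pv_headD_drop]
    have hdrop : choices.drop (k + 1) = (choices.drop k).tail := List.tail_drop.symm
    by_cases hb : (s == fwd || s == rev) = true
    · rw [if_pos hb, List.foldl_cons, hk1, ih (k + 1), hdrop]
      simp only [pvSum]
      by_cases hf : (s == fwd) = true
      · rw [if_pos hf]
        have hc : pvContrib fwd rev s ((choices.drop k).headD 0) = 4 - (choices.drop k).headD 0 := by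
          have : s = fwd := by simpa [beq_iff_eq] using hf
          simp [pvContrib, this]
        rw [hc, hget]; ring
      · rw [if_neg hf]
        have hsr : s = rev := by
          rcases Bool.or_eq_true_iff.mp hb with h | h
          · exact absurd h hf
          · simpa [beq_iff_eq] using h
        have hsf : ¬ s = fwd := by
          intro h; exact hf (by simp [h])
        have hrf : ¬ rev = fwd := fun h => hsf (hsr.trans h)
        have hc : pvContrib fwd rev s ((choices.drop k).headD 0) = (choices.drop k).headD 0 - 4 := by
          simp [pvContrib, hsr, hrf]
        rw [hc, hget]; ring
    · rw [if_neg hb, hk1, ih (k + 1), hdrop]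
      have hsf : ¬ s = fwd := by intro h; apply hb; simp [h]
      have hsr : ¬ s = rev := by intro h; apply hb; simp [h]
      have hc : pvContrib fwd rev s ((choices.drop k).headD 0) = 0 := by
        simp [pvContrib, hsf, hsr]
      simp only [pvSum, hc, zero_add]

theorem pvPick_eq (first second : Char) (survey : List String) (choices : List Int) :
    pvPick first second survey choices =
      (if pvSum (String.ofList [first, second]) (String.ofList [second, first]) survey choices ≥ 0
       then String.ofList [first] else String.ofList [second]) := by
  unfold pvPick
  have h := pvPick_sum (String.ofList [first, second]) (String.ofList [second, first]) choices survey 0 0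
  simp only [Nat.cast_zero, List.drop_zero, zero_add] at h
  simp only [h]

def pvFinalA (tb : pvSt) : String :=
  let ((t00, t01, t02, t03), (t10, t11, t12, t13)) := tb
  let answer : String := ""
  let answer := answer ++ (if t00 ≥ t10 then "R" else "T")
  let answer := answer ++ (if t01 ≥ t11 then "C" else "F")
  let answer := answer ++ (if t02 ≥ t12 then "J" else "M")
  let answer := answer ++ (if t03 ≥ t13 then "A" else "N")
  answer

theorem pv_solution_eq (survey : List String) (choices : List Int) :
    solution survey choices = pvFinalA ((PySem.List.pyRange 0 (survey.length : Int) 1).foldl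
      (fun tb i => pvStepA tb (PySem.List.pyGetD survey i "") (PySem.List.pyGetD choices i 0))
      (((0, 0, 0, 0), (0, 0, 0, 0)) : pvSt)) := rfl

-- ===== VERDICT (by name: the statement is the Claim_ definition above) =====
theorem solution_spec : Claim_equal_solution := by
  intro survey choices _ _
  unfold Spec_solution
  have hr := pv_rangeA survey choices survey.length 0 (by omega)
  simp only [Nat.cast_zero, List.drop_zero] at hr
  rw [pv_solution_eq, hr]
  obtain ⟨d1, d2, d3, d4⟩ :=
    pvLoopA_diff survey choices (((0, 0, 0, 0), (0, 0, 0, 0)) : pvSt)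
  unfold solution_alt
  rw [pvPick_eq, pvPick_eq, pvPick_eq, pvPick_eq]
  set tb := pvLoopA survey choices (((0, 0, 0, 0), (0, 0, 0, 0)) : pvSt) with htb
  obtain ⟨⟨t00, t01, t02, t03⟩, ⟨t10, t11, t12, t13⟩⟩ := tb
  simp only at d1 d2 d3 d4
  have e1 : (t00 ≥ t10) = (pvSum "RT" "TR" survey choices ≥ 0) := by
    apply propext; constructor <;> intro <;> omega
  have e2 : (t01 ≥ t11) = (pvSum "CF" "FC" survey choices ≥ 0) := by
    apply propext; constructor <;> intro <;> omega
  have e3 : (t02 ≥ t12) = (pvSum "JM" "MJ" survey choices ≥ 0) := by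
    apply propext; constructor <;> intro <;> omega
  have e4 : (t03 ≥ t13) = (pvSum "AN" "NA" survey choices ≥ 0) := by
    apply propext; constructor <;> intro <;> omega
  simp only [pvFinalA, e1, e2, e3, e4,
    show String.ofList ['R', 'T'] = "RT" from rfl, show String.ofList ['T', 'R'] = "TR" from rfl,
    show String.ofList ['C', 'F'] = "CF" from rfl, show String.ofList ['F', 'C'] = "FC" from rfl,
    show String.ofList ['J', 'M'] = "JM" from rfl, show String.ofList ['M', 'J'] = "MJ" from rfl,
    show String.ofList ['A', 'N'] = "AN" from rfl, show String.ofList ['N', 'A'] = "NA" from rfl,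
    show String.ofList ['R'] = "R" from rfl, show String.ofList ['T'] = "T" from rfl,
    show String.ofList ['C'] = "C" from rfl, show String.ofList ['F'] = "F" from rfl,
    show String.ofList ['J'] = "J" from rfl, show String.ofList ['M'] = "M" from rfl,
    show String.ofList ['A'] = "A" from rfl, show String.ofList ['N'] = "N" from rfl]
  by_cases h1 : pvSum "RT" "TR" survey choices ≥ 0 <;>
  by_cases h2 : pvSum "CF" "FC" survey choices ≥ 0 <;>
  by_cases h3 : pvSum "JM" "MJ" survey choices ≥ 0 <;>
  by_cases h4 : pvSum "AN" "NA" survey choices ≥ 0 <;>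
    simp [h1, h2, h3, h4]
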